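-- pv_equiv track=rewrite | github.com/thaaer234/bro | accounts/migrations/0009_backfill_academic_year_scope.py | _pick_single_year_id
-- ===== SOURCE A (Python) =====
-- from collections import Counter
--
-- def _pick_single_year_id(candidates):
--     cleaned = [candidate for candidate in candidates if candidate]
--     if not cleaned:
--         return None
--     counts = Counter(cleaned)
--     if len(counts) == 1:
--         return cleaned[0]
--     top_year_id, top_count = counts.most_common(1)[0]
--     tied = [year_id for year_id, count in counts.items() if count == top_count]
--     if len(tied) == 1:
--         return top_year_id
--     return None
-- ===== SOURCE B (Python) =====
-- def _pick_single_year_id(candidates):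
--     cleaned = sorted(c for c in candidates if c)
--     best_val = None
--     best_len = 0
--     ties = 0
--     i = 0
--     n = len(cleaned)
--     while i < n:
--         j = i
--         while j < n and cleaned[j] == cleaned[i]:
--             j += 1
--         run = j - i
--         if run > best_len:
--             best_val, best_len, ties = cleaned[i], run, 1
--         elif run == best_len:
--             ties += 1
--         i = j
--     return best_val if ties == 1 else None
-- ===== Notes on version B (the rewrite author's own statement) =====
-- stated objective: alternative
-- what changed: Replaced the Counter/most_common/tie-filter pipeline by sorting the cleaned values and making one pass over the sorted list, grouping equal consecutive elements into runs and tracking the longest run's value, length and how many distinct values attain it.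
import Mathlib
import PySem

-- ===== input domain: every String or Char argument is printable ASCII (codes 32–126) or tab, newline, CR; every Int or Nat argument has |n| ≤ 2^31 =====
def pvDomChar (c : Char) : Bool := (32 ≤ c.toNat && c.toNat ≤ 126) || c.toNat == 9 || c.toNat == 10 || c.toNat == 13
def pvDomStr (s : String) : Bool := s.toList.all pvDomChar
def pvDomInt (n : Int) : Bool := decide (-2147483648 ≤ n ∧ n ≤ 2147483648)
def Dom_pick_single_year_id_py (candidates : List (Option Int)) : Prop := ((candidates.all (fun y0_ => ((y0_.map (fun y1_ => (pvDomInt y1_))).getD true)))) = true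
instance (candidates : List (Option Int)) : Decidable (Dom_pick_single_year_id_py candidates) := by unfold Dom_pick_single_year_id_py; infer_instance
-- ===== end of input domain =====

-- B replaces Counter + most_common + tie filtering by a sort followed by one run-length
-- scan that tracks the longest run and how many distinct values attain it (alternative
-- algorithm, same result).

-- ===== PORT A =====
def pick_single_year_id_py (candidates : List (Option Int)) : Option Int :=
  -- cleaned = [candidate for candidate in candidates if candidate]  (None and 0 are falsy)
  let cleaned := candidates.filterMap (fun c =>
    match c with
    | none => none
    | some x => if x = 0 then none else some x)
  match cleaned with
  | [] => none                                   -- if not cleaned: return None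
  | c0 :: _ =>
    let counts := PySem.Dict.counter cleaned     -- counts = Counter(cleaned)
    if counts.size = 1 then some c0              -- return cleaned[0]
    else
      -- counts.most_common(1)[0] = head of the items sorted by count descending (stable)
      match PySem.List.sorted counts.items (fun p => p.2) true with
      | [] => none                               -- unreachable: counts is nonempty here
      | (top_year_id, top_count) :: _ =>
        let tied := (counts.items.filter (fun p => p.2 == top_count)).map (fun p => p.1)
        if tied.length = 1 then some top_year_id else none

-- ===== PORT B =====
-- the outer while loop of Source B: consumes one run (the inner while = takeWhile) per step,
-- carrying (best_val, best_len, ties)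
def pvRunScan : List Int → Option Int → Int → Int → (Option Int × Int × Int)
  | [], best_val, best_len, ties => (best_val, best_len, ties)
  | v :: rest, best_val, best_len, ties =>
    let run : Int := 1 + (rest.takeWhile (fun x => x == v)).length
    let rest' := rest.dropWhile (fun x => x == v)
    if run > best_len then pvRunScan rest' (some v) run 1
    else if run = best_len then pvRunScan rest' best_val best_len (ties + 1)
    else pvRunScan rest' best_val best_len ties
termination_by l => l.length
decreasing_by
  all_goals
    exact Nat.lt_succ_of_le (List.length_dropWhile_le _ _)

def pick_single_year_id_py_alt (candidates : List (Option Int)) : Option Int :=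
  let cleaned := PySem.List.sorted (candidates.filterMap (fun c =>
    match c with
    | none => none
    | some x => if x = 0 then none else some x)) (fun x => x) false
  match pvRunScan cleaned none 0 0 with
  | (best_val, _, ties) => if ties = 1 then best_val else none

-- ===== PRECONDITION & SPEC =====
def Spec_pick_single_year_id_py (candidates : List (Option Int)) (out : Option Int) : Prop := out = pick_single_year_id_py_alt candidates
instance (candidates : List (Option Int)) (out : Option Int) : Decidable (Spec_pick_single_year_id_py candidates out) := by unfold Spec_pick_single_year_id_py; infer_instance

-- ===== CLAIM (what is proved, stated in full; the proofs are below) =====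
def Claim_equal_pick_single_year_id_py : Prop := ∀ (candidates : List (Option Int)), Dom_pick_single_year_id_py candidates → Spec_pick_single_year_id_py candidates (pick_single_year_id_py candidates)

-- ===== LEMMAS AND PROOFS =====

-- the pairs (value, multiplicity) of a list, keyed by first occurrence
def pvPairs (l : List Int) : List (Int × Int) :=
  (PySem.Set.ofList l).map (fun k => (k, (l.count k : Int)))

-- the common specification: the fst of the unique pair of maximal snd, if it is unique
def pvMode (ps : List (Int × Int)) : Option Int :=
  match ps.filter (fun p => ps.all (fun q => q.2 ≤ p.2)) with
  | [p] => some p.1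
  | _ => none

-- the run decomposition of a list (the pairs B's scan visits)
def pvRuns : List Int → List (Int × Int)
  | [] => []
  | v :: rest =>
    (v, (1 + (rest.takeWhile (fun x => x == v)).length : Int)) ::
      pvRuns (rest.dropWhile (fun x => x == v))
termination_by l => l.length
decreasing_by
  all_goals
    exact Nat.lt_succ_of_le (List.length_dropWhile_le _ _)

-- one step of B's accumulator
def pvStep (acc : Option Int × Int × Int) (p : Int × Int) : Option Int × Int × Int :=
  if p.2 > acc.2.1 then (some p.1, p.2, 1)
  else if p.2 = acc.2.1 then (acc.1, acc.2.1, acc.2.2 + 1)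
  else acc

def pvMaxSnd (ps : List (Int × Int)) : Int := ps.foldl (fun a p => max a p.2) 0

theorem pvMode_perm {ps qs : List (Int × Int)} (h : ps.Perm qs) : pvMode ps = pvMode qs := by
  have hall : ∀ p : Int × Int,
      (ps.all (fun q => q.2 ≤ p.2)) = qs.all (fun q => q.2 ≤ p.2) := by
    intro p
    rw [Bool.eq_iff_iff]
    simp only [List.all_eq_true]
    constructor
    · intro hp q hq; exact hp q (h.mem_iff.mpr hq)
    · intro hp q hq; exact hp q (h.mem_iff.mp hq)
  have hfp : (ps.filter (fun p => ps.all (fun q => q.2 ≤ p.2))).Perm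
      (qs.filter (fun p => qs.all (fun q => q.2 ≤ p.2))) := by
    have heq : (ps.filter (fun p => ps.all (fun q => q.2 ≤ p.2))) =
        ps.filter (fun p => qs.all (fun q => q.2 ≤ p.2)) :=
      List.filter_congr (fun p _ => hall p)
    rw [heq]
    exact h.filter _
  unfold pvMode
  rcases hA : ps.filter (fun p => ps.all (fun q => q.2 ≤ p.2)) with _ | ⟨a, _ | ⟨a', as⟩⟩ <;>
    rw [hA] at hfp <;> rw [hA]
  · rw [hfp.symm.eq_nil]
  · rw [List.perm_singleton.mp hfp.symm]
  · have hlen := hfp.length_eq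
    rcases hB : qs.filter (fun p => qs.all (fun q => q.2 ≤ p.2)) with _ | ⟨b, _ | ⟨b', bs⟩⟩ <;>
      rw [hB] at hlen <;> rw [hB] <;> simp at hlen ⊢

theorem pvMaxSnd_append (ps : List (Int × Int)) (p : Int × Int) :
    pvMaxSnd (ps ++ [p]) = max (pvMaxSnd ps) p.2 := by
  unfold pvMaxSnd
  simp [List.foldl_append]

theorem le_pvMaxSnd (ps : List (Int × Int)) : ∀ p ∈ ps, p.2 ≤ pvMaxSnd ps := by
  induction ps using List.reverseRecOn with
  | nil => simp
  | append_singleton ps q ih =>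
    intro p hp
    rw [pvMaxSnd_append]
    rcases List.mem_append.mp hp with h | h
    · exact le_trans (ih p h) (le_max_left _ _)
    · simp at h; subst h; exact le_max_right _ _

theorem pvMaxSnd_attained (ps : List (Int × Int)) (h0 : 0 < pvMaxSnd ps) :
    ∃ p ∈ ps, p.2 = pvMaxSnd ps := by
  induction ps using List.reverseRecOn with
  | nil => simp [pvMaxSnd] at h0
  | append_singleton ps p ih =>
    rw [pvMaxSnd_append] at h0 ⊢
    rcases le_or_gt p.2 (pvMaxSnd ps) with h | h
    · have hm : max (pvMaxSnd ps) p.2 = pvMaxSnd ps := by omega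
      rw [hm] at h0 ⊢
      obtain ⟨q, hq, hq2⟩ := ih h0
      exact ⟨q, List.mem_append_left _ hq, hq2⟩
    · have hm : max (pvMaxSnd ps) p.2 = p.2 := by omega
      rw [hm]
      exact ⟨p, List.mem_append_right _ (by simp), rfl⟩

-- a filter for the maximum of a nonempty positive list is nonempty
theorem pvFilter_max_ne_nil (ps : List (Int × Int)) (h1 : ∀ p ∈ ps, 1 ≤ p.2)
    (hne : ps ≠ []) : ps.filter (fun p => p.2 = pvMaxSnd ps) ≠ [] := by
  obtain ⟨q, hq⟩ := List.exists_mem_of_ne_nil ps hne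
  have h0 : 0 < pvMaxSnd ps := lt_of_lt_of_le (by have := h1 q hq; omega) (le_pvMaxSnd ps q hq)
  obtain ⟨r, hr, hr2⟩ := pvMaxSnd_attained ps h0
  intro hnil
  rw [List.filter_eq_nil_iff] at hnil
  have := hnil r hr
  simp only [decide_eq_true_eq] at this
  exact this hr2

-- the scan's accumulator after visiting pairs ps (all of multiplicity ≥ 1)
theorem pvFold_spec (ps : List (Int × Int)) (h1 : ∀ p ∈ ps, 1 ≤ p.2) :
    ps.foldl pvStep (none, 0, 0) =
      (match ps.filter (fun p => p.2 = pvMaxSnd ps) with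
       | [] => (none, 0, 0)
       | q :: qs => (some q.1, pvMaxSnd ps, ((q :: qs).length : Int))) := by
  induction ps using List.reverseRecOn with
  | nil => simp [pvMaxSnd]
  | append_singleton ps p ih =>
    have h1' : ∀ q ∈ ps, 1 ≤ q.2 := fun q hq => h1 q (List.mem_append_left _ hq)
    have hp1 : 1 ≤ p.2 := h1 p (List.mem_append_right _ (by simp))
    have hIH := ih h1'
    rw [List.foldl_append, List.foldl_cons, List.foldl_nil, hIH, pvMaxSnd_append]
    rcases lt_trichotomy (pvMaxSnd ps) p.2 with hlt | heq | hgt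
    · -- p starts a strictly longer run: it becomes the unique best
      have hmax : max (pvMaxSnd ps) p.2 = p.2 := max_eq_right (le_of_lt hlt)
      have hfilt : (ps ++ [p]).filter (fun q => q.2 = max (pvMaxSnd ps) p.2) = [p] := by
        rw [hmax, List.filter_append]
        have h0 : ps.filter (fun q => q.2 = p.2) = [] := by
          rw [List.filter_eq_nil_iff]
          intro q hq
          simp only [decide_eq_true_eq]
          exact ne_of_lt (lt_of_le_of_lt (le_pvMaxSnd ps q hq) hlt)
        simp [h0]
      rw [hfilt, hmax]
      rcases hF : ps.filter (fun q => q.2 = pvMaxSnd ps) with _ | ⟨q, qs⟩ <;> rw [hF]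
      · have hc : p.2 > (0 : Int) := by omega
        simp [pvStep, hc]
      · have hc : p.2 > pvMaxSnd ps := hlt
        simp [pvStep, hc]
    · -- p's run ties the current best: ties increases by one
      have hne : ps ≠ [] := by
        intro h
        subst h
        have h0 : pvMaxSnd ([] : List (Int × Int)) = 0 := rfl
        omega
      have hmax : max (pvMaxSnd ps) p.2 = pvMaxSnd ps := by omega
      rcases hF : ps.filter (fun q => q.2 = pvMaxSnd ps) with _ | ⟨q, qs⟩
      · exact absurd hF (pvFilter_max_ne_nil ps h1' hne)
      · have hfilt : (ps ++ [p]).filter (fun q => q.2 = max (pvMaxSnd ps) p.2) =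
            q :: (qs ++ [p]) := by
          rw [hmax, List.filter_append, hF]
          simp [heq]
        rw [hfilt, hmax, hF]
        have hc1 : ¬ (p.2 > pvMaxSnd ps) := by omega
        have hc2 : p.2 = pvMaxSnd ps := heq.symm
        simp [pvStep, hc1, hc2, List.length_append]
    · -- p's run is shorter: nothing changes
      have hne : ps ≠ [] := by
        intro h
        subst h
        have h0 : pvMaxSnd ([] : List (Int × Int)) = 0 := rfl
        omega
      have hmax : max (pvMaxSnd ps) p.2 = pvMaxSnd ps := by omega
      have hfilt : (ps ++ [p]).filter (fun q => q.2 = max (pvMaxSnd ps) p.2) =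
          ps.filter (fun q => q.2 = pvMaxSnd ps) := by
        rw [hmax, List.filter_append]
        have h0 : [p].filter (fun q => q.2 = pvMaxSnd ps) = [] := by
          simp only [List.filter_cons, List.filter_nil]
          rw [if_neg (by simp only [decide_eq_true_eq]; omega)]
        simp [h0]
      rw [hfilt, hmax]
      rcases hF : ps.filter (fun q => q.2 = pvMaxSnd ps) with _ | ⟨q, qs⟩ <;> rw [hF]
      · exact absurd hF (pvFilter_max_ne_nil ps h1' hne)
      · have hc1 : ¬ (p.2 > pvMaxSnd ps) := by omega
        have hc2 : ¬ (p.2 = pvMaxSnd ps) := by omega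
        simp [pvStep, hc1, hc2]

-- B's final decision over any pair list with positive multiplicities equals pvMode
theorem pvFold_mode (ps : List (Int × Int)) (h1 : ∀ p ∈ ps, 1 ≤ p.2) :
    (match ps.foldl pvStep (none, 0, 0) with
     | (best_val, _, ties) => if ties = 1 then best_val else none) = pvMode ps := by
  have hspec := pvFold_spec ps h1
  have hfc : ps.filter (fun p => ps.all (fun q => q.2 ≤ p.2)) =
      ps.filter (fun p => p.2 = pvMaxSnd ps) := by
    apply List.filter_congr
    intro p hp
    rw [Bool.eq_iff_iff]
    simp only [List.all_eq_true, decide_eq_true_eq]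
    have h0 : 0 < pvMaxSnd ps :=
      lt_of_lt_of_le (by have := h1 p hp; omega) (le_pvMaxSnd ps p hp)
    obtain ⟨r, hr, hr2⟩ := pvMaxSnd_attained ps h0
    constructor
    · intro hdom
      have ha := le_pvMaxSnd ps p hp
      have hb := hdom r hr
      omega
    · intro hmax q hq
      rw [hmax]
      exact le_pvMaxSnd ps q hq
  rw [hspec]
  unfold pvMode
  rw [hfc]
  rcases hF : ps.filter (fun p => p.2 = pvMaxSnd ps) with _ | ⟨q, _ | ⟨q', qs⟩⟩ <;> rw [hF]
  · simp
  · simp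
  · simp
    omega

-- ===== the run decomposition of a sorted list =====

theorem pvSorted_head_decomp {v : Int} {rest : List Int}
    (hs : (v :: rest).Pairwise (· ≤ ·)) :
    rest.takeWhile (fun x => x == v) = List.replicate (rest.takeWhile (fun x => x == v)).length v ∧
    v ∉ rest.dropWhile (fun x => x == v) ∧
    (rest.dropWhile (fun x => x == v)).Pairwise (· ≤ ·) ∧
    ((v :: rest).count v : Int) = 1 + ((rest.takeWhile (fun x => x == v)).length : Int) ∧
    (∀ x : Int, x ≠ v → (v :: rest).count x = (rest.dropWhile (fun x => x == v)).count x) := by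
  have hrep : rest.takeWhile (fun x => x == v) =
      List.replicate (rest.takeWhile (fun x => x == v)).length v := by
    rw [List.eq_replicate_iff]
    refine ⟨rfl, ?_⟩
    intro b hb
    have hbv := List.mem_takeWhile_imp (p := fun x => x == v) hb
    exact eq_of_beq hbv
  have hdw_pw : (rest.dropWhile (fun x => x == v)).Pairwise (· ≤ ·) :=
    List.Pairwise.sublist (List.dropWhile_sublist _) (List.Pairwise.of_cons hs)
  have hhead : ∀ y ∈ rest, v ≤ y := by
    intro y hy
    exact (List.pairwise_cons.mp hs).1 y hy
  have hvnot : v ∉ rest.dropWhile (fun x => x == v) := by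
    rcases hd : rest.dropWhile (fun x => x == v) with _ | ⟨w, t⟩
    · simp
    · have hw_pred : (w == v) = false := by
        have h := List.head?_dropWhile_not (fun x => x == v) rest
        rw [hd] at h
        simpa using h
      have hwv : w ≠ v := by simpa using hw_pred
      have hw_mem : w ∈ rest := (List.dropWhile_sublist _).mem (by rw [hd]; simp)
      have hvw : v < w := lt_of_le_of_ne (hhead w hw_mem) (Ne.symm hwv)
      have hpw : (w :: t).Pairwise ((· ≤ ·) : Int → Int → Prop) := by rw [← hd]; exact hdw_pw
      intro hmem
      rcases List.mem_cons.mp hmem with h | h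
      · exact hwv h.symm
      · have := (List.pairwise_cons.mp hpw).1 v h
        omega
  have hsplit : rest = rest.takeWhile (fun x => x == v) ++ rest.dropWhile (fun x => x == v) :=
    (List.takeWhile_append_dropWhile (p := fun x => x == v) (l := rest)).symm
  have hcnt_take : (rest.takeWhile (fun x => x == v)).count v =
      (rest.takeWhile (fun x => x == v)).length := by
    conv_lhs => rw [hrep]
    simp [List.count_replicate]
  have hcnt_drop : (rest.dropWhile (fun x => x == v)).count v = 0 :=
    List.count_eq_zero.mpr hvnot
  have hrest_count : rest.count v = (rest.takeWhile (fun x => x == v)).length := by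
    conv_lhs => rw [hsplit]
    rw [List.count_append, hcnt_take, hcnt_drop]
    omega
  have hcount_v : ((v :: rest).count v : Int) =
      1 + ((rest.takeWhile (fun x => x == v)).length : Int) := by
    rw [List.count_cons_self, hrest_count]
    push_cast
    ring
  refine ⟨hrep, hvnot, hdw_pw, hcount_v, ?_⟩
  intro x hx
  have hcnt_take_x : (rest.takeWhile (fun x => x == v)).count x = 0 := by
    rw [List.count_eq_zero]
    rw [hrep]
    intro hmem
    exact hx (List.eq_of_mem_replicate hmem)
  rw [List.count_cons_of_ne hx.symm]
  conv_lhs => rw [hsplit]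
  rw [List.count_append, hcnt_take_x]
  omega

-- the scan is the fold of pvStep over the run pairs
theorem pvRunScan_eq_foldl (s : List Int) :
    ∀ (bv : Option Int) (bl t : Int),
    pvRunScan s bv bl t = (pvRuns s).foldl pvStep (bv, bl, t) := by
  induction s using pvRuns.induct with
  | case1 => intro bv bl t; rw [pvRunScan, pvRuns]; simp
  | case2 v rest ih =>
    intro bv bl t
    rw [pvRunScan, pvRuns, List.foldl_cons]
    rw [show pvStep (bv, bl, t) (v, 1 + ((rest.takeWhile (fun x => x == v)).length : Int)) =
        (if 1 + ((rest.takeWhile (fun x => x == v)).length : Int) > bl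
         then (some v, 1 + ((rest.takeWhile (fun x => x == v)).length : Int), 1)
         else if 1 + ((rest.takeWhile (fun x => x == v)).length : Int) = bl
         then (bv, bl, t + 1) else (bv, bl, t)) from rfl]
    show (if 1 + ((rest.takeWhile (fun x => x == v)).length : Int) > bl
        then pvRunScan (rest.dropWhile (fun x => x == v)) (some v)
          (1 + ((rest.takeWhile (fun x => x == v)).length : Int)) 1
        else if 1 + ((rest.takeWhile (fun x => x == v)).length : Int) = bl
        then pvRunScan (rest.dropWhile (fun x => x == v)) bv bl (t + 1)
        else pvRunScan (rest.dropWhile (fun x => x == v)) bv bl t) = _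
    split_ifs with h1 h2
    · exact ih _ _ _
    · exact ih _ _ _
    · exact ih _ _ _

-- over a sorted list the run pairs carry exactly the multiplicities
theorem pvRuns_sorted_spec (s : List Int) (hs : s.Pairwise (· ≤ ·)) :
    ((pvRuns s).map Prod.fst).Nodup ∧
    (∀ x : Int, x ∈ (pvRuns s).map Prod.fst ↔ x ∈ s) ∧
    (∀ p ∈ pvRuns s, p.2 = (s.count p.1 : Int)) := by
  induction s using pvRuns.induct with
  | case1 => simp [pvRuns]
  | case2 v rest ih =>
    obtain ⟨hrep, hvnot, hdw_pw, hcv, hcx⟩ := pvSorted_head_decomp hs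
    obtain ⟨ihnd, ihmem, ihcnt⟩ := ih hdw_pw
    have hmem_rest' : ∀ x : Int, x ∈ rest.dropWhile (fun x => x == v) → x ∈ rest :=
      fun x hx => (List.dropWhile_sublist _).mem hx
    have hmem_s : ∀ x : Int, x ∈ v :: rest ↔ (x = v ∨ x ∈ rest.dropWhile (fun x => x == v)) := by
      intro x
      constructor
      · intro hx
        rcases List.mem_cons.mp hx with h | hx
        · exact Or.inl h
        · conv at hx => rw [← List.takeWhile_append_dropWhile (p := fun x => x == v) (l := rest)]
          rcases List.mem_append.mp hx with h | h
          · left; rw [hrep] at h; exact List.eq_of_mem_replicate h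
          · right; exact h
      · rintro (rfl | hx)
        · exact List.mem_cons_self
        · exact List.mem_cons_of_mem _ (hmem_rest' x hx)
    have hruns : pvRuns (v :: rest) =
        (v, (1 + ((rest.takeWhile (fun x => x == v)).length : Int))) ::
          pvRuns (rest.dropWhile (fun x => x == v)) := by
      rw [pvRuns]
    refine ⟨?_, ?_, ?_⟩
    · rw [hruns]
      simp only [List.map_cons, List.nodup_cons]
      refine ⟨?_, ihnd⟩
      intro hv
      exact hvnot ((ihmem v).mp hv)
    · intro x
      rw [hruns, hmem_s]
      simp only [List.map_cons, List.mem_cons]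
      rw [ihmem]
    · intro p hp
      rw [hruns] at hp
      rcases List.mem_cons.mp hp with rfl | hp
      · exact hcv.symm ▸ hcv
      · have hp1 : p.1 ∈ rest.dropWhile (fun x => x == v) :=
          (ihmem p.1).mp (List.mem_map_of_mem hp)
        have hp1v : p.1 ≠ v := fun h => hvnot (h ▸ hp1)
        rw [ihcnt p hp]
        rw [hcx p.1 hp1v]

theorem pvRuns_pos (s : List Int) : ∀ p ∈ pvRuns s, 1 ≤ p.2 := by
  induction s using pvRuns.induct with
  | case1 => simp [pvRuns]
  | case2 v rest ih =>
    rw [pvRuns]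
    intro p hp
    rcases List.mem_cons.mp hp with rfl | hp
    · simp
    · exact ih p hp

theorem pvRuns_perm_pairs (s : List Int) (hs : s.Pairwise (· ≤ ·)) :
    (pvRuns s).Perm (pvPairs s) := by
  obtain ⟨hnd, hmem, hcnt⟩ := pvRuns_sorted_spec s hs
  have hkeys : ((pvRuns s).map Prod.fst).Perm (PySem.Set.ofList s) := by
    rw [List.perm_ext_iff_of_nodup hnd (PySem.Set.nodup_ofList s)]
    intro x
    rw [hmem, PySem.Set.mem_ofList]
  have hself : pvRuns s = ((pvRuns s).map Prod.fst).map (fun k => (k, (s.count k : Int))) := by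
    rw [List.map_map]
    conv_lhs => rw [← List.map_id (pvRuns s)]
    apply List.map_congr_left
    intro p hp
    have := hcnt p hp
    simp [Function.comp]
    exact Prod.ext rfl this
  rw [hself]
  unfold pvPairs
  exact hkeys.map _

theorem pvPairs_perm_of_perm {l l' : List Int} (h : l.Perm l') :
    (pvPairs l).Perm (pvPairs l') := by
  have hkeys : (PySem.Set.ofList l).Perm (PySem.Set.ofList l') := by
    rw [List.perm_ext_iff_of_nodup (PySem.Set.nodup_ofList l) (PySem.Set.nodup_ofList l')]
    intro x
    rw [PySem.Set.mem_ofList, PySem.Set.mem_ofList]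
    exact h.mem_iff
  have hmap : pvPairs l' = (PySem.Set.ofList l').map (fun k => (k, (l.count k : Int))) := by
    unfold pvPairs
    apply List.map_congr_left
    intro k _
    rw [h.count_eq]
  rw [hmap]
  unfold pvPairs
  exact hkeys.map _

-- B computes pvMode of the pair list of cleaned
theorem pvB_char (cleaned : List Int) :
    (match pvRunScan (PySem.List.sorted cleaned (fun x => x) false) none 0 0 with
     | (best_val, _, ties) => if ties = 1 then best_val else none) = pvMode (pvPairs cleaned) := by
  have hs : (PySem.List.sorted cleaned (fun x => x) false).Pairwise (· ≤ ·) := by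
    have := PySem.List.sorted_pairwise cleaned (fun x => x)
    simpa using this
  rw [pvRunScan_eq_foldl]
  rw [pvFold_mode _ (pvRuns_pos _)]
  rw [pvMode_perm (pvRuns_perm_pairs _ hs)]
  exact pvMode_perm (pvPairs_perm_of_perm (PySem.List.sorted_perm cleaned (fun x => x) false))

-- A computes pvMode of the pair list of cleaned
theorem pvA_char (cleaned : List Int) :
    (match cleaned with
     | [] => (none : Option Int)
     | c0 :: _ =>
       let counts := PySem.Dict.counter cleaned
       if counts.size = 1 then some c0
       else
         match PySem.List.sorted counts.items (fun p => p.2) true with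
         | [] => none
         | (top_year_id, top_count) :: _ =>
           let tied := (counts.items.filter (fun p => p.2 == top_count)).map (fun p => p.1)
           if tied.length = 1 then some top_year_id else none) = pvMode (pvPairs cleaned) := by
  rcases cleaned with _ | ⟨c0, cl⟩
  · simp [pvMode, pvPairs, PySem.Set.ofList, PySem.Set.empty]
  · set cleaned := c0 :: cl with hcleaned
    have hitems : (PySem.Dict.counter cleaned).items = pvPairs cleaned := by
      rw [PySem.Dict.items_counter]
      rfl
    have hc0mem : c0 ∈ PySem.Set.ofList cleaned := (PySem.Set.mem_ofList _ _).mpr (by simp [hcleaned])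
    have hitems_ne : (PySem.Dict.counter cleaned).items ≠ [] := by
      rw [hitems]
      unfold pvPairs
      simp only [ne_eq, List.map_eq_nil_iff]
      intro h
      rw [h] at hc0mem
      simp at hc0mem
    by_cases hsize : (PySem.Dict.counter cleaned).size = 1
    · -- a single distinct value: A returns cleaned[0]; pvMode of a singleton pair list
      have : ∃ p, (PySem.Dict.counter cleaned).items = [p] := by
        rcases h : (PySem.Dict.counter cleaned).items with _ | ⟨p, _ | _⟩
        · exact absurd h hitems_ne
        · exact ⟨p, rfl⟩
        · exfalso
          unfold PySem.Dict.size at hsize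
          rw [h] at hsize
          simp at hsize
      rcases this with ⟨p, hp⟩
      have hp1 : p.1 = c0 := by
        have hk : c0 ∈ (PySem.Dict.counter cleaned).keys := by
          rw [PySem.Dict.keys_counter]
          exact hc0mem
        unfold PySem.Dict.keys at hk
        rw [hp] at hk
        simp at hk
        exact hk.symm
      have hpv : pvPairs cleaned = [p] := by rw [← hitems, hp]
      rw [hpv]
      simp only [hsize, if_true]
      unfold pvMode
      simp [hp1]
      all_goals rfl
    · -- several distinct values: most_common head vs the tied filter
      have hsorted_ne : PySem.List.sorted (PySem.Dict.counter cleaned).items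
          (fun p => p.2) true ≠ [] := by
        rw [ne_eq, PySem.List.sorted_eq_nil_iff]
        exact hitems_ne
      rcases hsrt : PySem.List.sorted (PySem.Dict.counter cleaned).items (fun p => p.2) true with
        _ | ⟨⟨t, tc⟩, srest⟩
      · exact absurd hsrt hsorted_ne
      · have htop_mem : (t, tc) ∈ (PySem.Dict.counter cleaned).items := by
          have : (t, tc) ∈ PySem.List.sorted (PySem.Dict.counter cleaned).items
              (fun p => p.2) true := by rw [hsrt]; simp
          exact (PySem.List.mem_sorted _ _ _ _).mp this
        have htop_max : ∀ p ∈ (PySem.Dict.counter cleaned).items, p.2 ≤ tc := by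
          intro p hp
          exact PySem.List.key_head_sorted_rev_ge _ (fun p => p.2) hsrt p hp
        have hfc : (PySem.Dict.counter cleaned).items.filter
              (fun p => (PySem.Dict.counter cleaned).items.all (fun q => q.2 ≤ p.2)) =
            (PySem.Dict.counter cleaned).items.filter (fun p => p.2 == tc) := by
          apply List.filter_congr
          intro p hp
          rw [Bool.eq_iff_iff]
          simp only [List.all_eq_true, decide_eq_true_eq, beq_iff_eq]
          constructor
          · intro hdom
            have h1 := htop_max p hp
            have h2 := hdom (t, tc) htop_mem
            simp at h2
            omega
          · intro hmax q hq
            rw [hmax]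
            exact htop_max q hq
        have hmode : pvMode (pvPairs cleaned) =
            match (PySem.Dict.counter cleaned).items.filter (fun p => p.2 == tc) with
            | [p] => some p.1
            | _ => none := by
          unfold pvMode
          rw [← hitems, hfc]
        rw [hmode]
        have htied_mem : (t, tc) ∈ (PySem.Dict.counter cleaned).items.filter
            (fun p => p.2 == tc) := by
          rw [List.mem_filter]
          exact ⟨htop_mem, by simp⟩
        rcases hF : (PySem.Dict.counter cleaned).items.filter (fun p => p.2 == tc) with
          _ | ⟨q, _ | ⟨q', qs⟩⟩
        · rw [hF] at htied_mem; simp at htied_mem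
        · have hq : q = (t, tc) := by
            rw [hF] at htied_mem
            exact (List.mem_singleton.mp htied_mem).symm
          simp [hsize, hsrt, hF, hq]
          all_goals rfl
        · simp [hsize, hsrt, hF]
          all_goals rfl

theorem pick_single_year_id_py_spec : Claim_equal_pick_single_year_id_py := by
  unfold Claim_equal_pick_single_year_id_py
  intro candidates _
  unfold Spec_pick_single_year_id_py
  unfold pick_single_year_id_py pick_single_year_id_py_alt
  rw [pvB_char, ← pvA_char]
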